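-- pv_equiv track=rewrite | github.com/yz4004/codeforce-python | daily/problem_list/2025/0603.py | solve
-- ===== SOURCE A (Python) =====
-- def solve(n,t, nums):
--     # [i,j]
--     j = n-1
--     s = 0
--     f = [0]*(n+1)
--     for i in range(n-1, -1, -1):
--         s += nums[i]
--         while s > t:
--             s -= nums[j]
--             j -= 1
--         # [i,j] j+1 j+2
--         if j < i:
--             f[i] = f[i+1]
--         if i <= j:
--             f[i] = (j - i + 1) + (f[j+2] if j+2 < n else 0)
--     return sum(f)
-- ===== SOURCE B (Python) =====
-- def _upper(P, x, lo, hi):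
--     # first index in [lo, hi) with P[idx] > x, or hi (bisect_right written out)
--     while lo < hi:
--         mid = (lo + hi) // 2
--         if P[mid] <= x:
--             lo = mid + 1
--         else:
--             hi = mid
--     return lo
--
-- def solve(n, t, nums):
--     if n <= 0:
--         return 0
--     P = [0] * (n + 1)
--     for k in range(n):
--         P[k + 1] = P[k] + nums[k]
--     f = [0] * (n + 1)
--     total = 0
--     for i in range(n - 1, -1, -1):
--         j = _upper(P, P[i] + t, i, n + 1) - 2
--         if j < i:
--             f[i] = f[i + 1]
--         else:
--             f[i] = (j - i + 1) + (f[j + 2] if j + 2 < n else 0)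
--         total += f[i]
--     return total
-- ===== Notes on version B (the rewrite author's own statement) =====
-- stated objective: alternative
-- what changed: B replaces A's carried two-pointer state (sticky j and running window sum s) by a precomputed prefix-sum table and an independent binary search per position to find the largest window end, accumulating the total as it goes.
-- outside the precondition, e.g. on solve(2, 0, [1, -1]): A returns 3, B returns 2; on solve(2, -3, [1, -6]): A returns 3, B returns 2; on solve(2, -5, [1, 0]): A raises IndexError, B returns 0
import Mathlib
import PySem

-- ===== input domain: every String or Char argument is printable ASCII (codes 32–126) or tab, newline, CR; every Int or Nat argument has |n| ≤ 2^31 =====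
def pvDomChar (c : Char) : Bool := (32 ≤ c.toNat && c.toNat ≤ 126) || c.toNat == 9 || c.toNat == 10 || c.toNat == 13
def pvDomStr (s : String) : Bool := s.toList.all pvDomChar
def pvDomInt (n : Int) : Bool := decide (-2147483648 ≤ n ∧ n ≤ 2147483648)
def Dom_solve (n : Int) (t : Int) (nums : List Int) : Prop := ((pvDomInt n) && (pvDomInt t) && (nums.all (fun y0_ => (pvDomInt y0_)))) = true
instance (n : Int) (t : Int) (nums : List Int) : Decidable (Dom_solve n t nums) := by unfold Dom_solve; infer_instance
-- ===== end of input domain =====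

-- B replaces A's carried two-pointer state by a prefix-sum table plus a per-index binary search
-- (an alternative decomposition of the same DP; return values agree on Pre_solve).

-- ===== PORT A =====
-- inner 'while s > t: s -= nums[j]; j -= 1'; pyGet? = none is Python's IndexError (excluded by
-- Pre_solve); the fuel chosen at each call site always suffices on inputs admitted by Pre_solve
def solveWhile (nums : List Int) (t : Int) : Nat → Int → Int → Int × Int
  | 0, s, j => (s, j)
  | fuel+1, s, j =>
    if s > t then
      match PySem.List.pyGet? nums j with
      | some v => solveWhile nums t fuel (s - v) (j - 1)
      | none => (s, j)
    else (s, j)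

-- one iteration of A's 'for i in range(n-1, -1, -1)' over the state (j, s, f);
-- i ≥ 0 on every element of the range, so 'f[i] = …' is List.set at i.toNat
def solveStep (n : Int) (t : Int) (nums : List Int) (st : Int × Int × List Int) (i : Int) :
    Int × Int × List Int :=
  let s0 := st.2.1 + (PySem.List.pyGet? nums i).getD 0
  let sj := solveWhile nums t (st.1 + nums.length + 2).toNat s0 st.1
  let s := sj.1
  let j := sj.2
  let f := st.2.2
  let f := if j < i then f.set i.toNat ((PySem.List.pyGet? f (i+1)).getD 0) else f
  let f := if i ≤ j then
      f.set i.toNat ((j - i + 1) + (if j + 2 < n then (PySem.List.pyGet? f (j+2)).getD 0 else 0))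
    else f
  (j, s, f)

def solve (n : Int) (t : Int) (nums : List Int) : Int :=
  let f := List.replicate (n+1).toNat 0
  let r := (PySem.List.pyRange (n-1) (-1) (-1)).foldl (solveStep n t nums) (n-1, 0, f)
  r.2.2.sum

-- ===== PORT B =====
-- Source B's hand-written bisect_right '_upper'; the gap hi-lo shrinks every turn, fuel bounds it
def upperStep (P : List Int) (x : Int) : Nat → Int → Int → Int
  | 0, lo, _ => lo
  | fuel+1, lo, hi =>
    if lo < hi then
      let mid := PySem.Int.floordiv (lo + hi) 2
      if (PySem.List.pyGet? P mid).getD 0 ≤ x then upperStep P x fuel (mid + 1) hi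
      else upperStep P x fuel lo mid
    else lo

-- Source B's prefix-sum table P
def buildP (n : Int) (nums : List Int) : List Int :=
  (PySem.List.pyRange 0 n 1).foldl
    (fun P k => P.set (k+1).toNat ((PySem.List.pyGet? P k).getD 0 + (PySem.List.pyGet? nums k).getD 0))
    (List.replicate (n+1).toNat 0)

-- one iteration of Source B's main loop over the state (f, total)
def altStep (n : Int) (t : Int) (P : List Int) (st : List Int × Int) (i : Int) :
    List Int × Int :=
  let j := upperStep P ((PySem.List.pyGet? P i).getD 0 + t) (n + 1 - i).toNat i (n + 1) - 2
  let f := st.1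
  let f := if j < i then f.set i.toNat ((PySem.List.pyGet? f (i+1)).getD 0)
           else f.set i.toNat ((j - i + 1) + (if j + 2 < n then (PySem.List.pyGet? f (j+2)).getD 0 else 0))
  (f, st.2 + (PySem.List.pyGet? f i).getD 0)

def solve_alt (n : Int) (t : Int) (nums : List Int) : Int :=
  if n ≤ 0 then 0
  else
    ((PySem.List.pyRange (n-1) (-1) (-1)).foldl (altStep n t (buildP n nums))
      (List.replicate (n+1).toNat 0, 0)).2

-- ===== PRECONDITION & SPEC =====
-- Pre_solve restricts to the problem's natural domain: a length-≥n array whose first n values are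
-- nonnegative, and a nonnegative budget t. Outside it A raises IndexError (n > len(nums), or t < 0
-- driving j below -len) or A's sticky two-pointer returns an accidental value: a negative element
-- (or negative t) corrupts the carried window sum for later iterations.
def Pre_solve (n : Int) (t : Int) (nums : List Int) : Prop :=
  n ≤ nums.length ∧ 0 ≤ t ∧ ∀ x ∈ nums.take n.toNat, 0 ≤ x
instance (n : Int) (t : Int) (nums : List Int) : Decidable (Pre_solve n t nums) := by
  unfold Pre_solve; infer_instance

def pvWitness_solve : Int × Int × List Int := (3, 5, [1, 2, 3])

def Spec_solve (n : Int) (t : Int) (nums : List Int) (out : Int) : Prop := out = solve_alt n t nums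
instance (n : Int) (t : Int) (nums : List Int) (out : Int) : Decidable (Spec_solve n t nums out) := by
  unfold Spec_solve; infer_instance

-- ===== CLAIM (what is proved, stated in full; the proofs are below) =====
def Claim_equal_solve : Prop := ∀ (n : Int) (t : Int) (nums : List Int),
  Dom_solve n t nums → Pre_solve n t nums → Spec_solve n t nums (solve n t nums)

-- ===== LEMMAS AND PROOFS =====

-- prefix sums of the first k values
def psum (nums : List Int) (k : Nat) : Int := (nums.take k).sum

-- largest window endpoint (as the exclusive prefix index): the greatest k ≤ m with
-- i ≤ k and psum k ≤ psum i + t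
def kfn (nums : List Int) (t : Int) (m i : Nat) : Nat :=
  Nat.findGreatest (fun k => i ≤ k ∧ psum nums k ≤ psum nums i + t) m

lemma psum_succ (nums : List Int) (k : Nat) (h : k < nums.length) :
    psum nums (k+1) = psum nums k + nums[k] := by
  simpa [psum] using List.sum_take_succ nums k h

lemma psum_mono (nums : List Int) (m : Nat) (hm : m ≤ nums.length)
    (hnn : ∀ x ∈ nums.take m, 0 ≤ x) :
    ∀ b, b ≤ m → ∀ a, a ≤ b → psum nums a ≤ psum nums b := by
  intro b
  induction b with
  | zero => intro _ a ha; interval_cases a; exact le_refl _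
  | succ b ih =>
    intro hb a ha
    rcases Nat.lt_or_ge a (b+1) with h | h
    · have h1 : psum nums a ≤ psum nums b := ih (by omega) a (by omega)
      have hbl : b < nums.length := by omega
      have hx : 0 ≤ nums[b] := by
        apply hnn
        have : b < (nums.take m).length := by simp [List.length_take]; omega
        have := List.getElem_mem (l := nums.take m) (n := b) (h := this)
        simpa [List.getElem_take] using this
      rw [psum_succ nums b hbl]
      omega
    · have : a = b + 1 := by omega
      simp [this]

lemma kfn_spec (nums : List Int) (t : Int) (m i : Nat) (ht : 0 ≤ t) (hi : i ≤ m) :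
    i ≤ kfn nums t m i ∧ kfn nums t m i ≤ m ∧
      psum nums (kfn nums t m i) ≤ psum nums i + t := by
  have hpi : i ≤ i ∧ psum nums i ≤ psum nums i + t := ⟨le_refl _, by omega⟩
  refine ⟨Nat.le_findGreatest hi hpi, Nat.findGreatest_le m, ?_⟩
  exact (Nat.findGreatest_spec (P := fun k => i ≤ k ∧ psum nums k ≤ psum nums i + t) hi hpi).2

lemma kfn_greatest (nums : List Int) (t : Int) (m i k : Nat)
    (hk : kfn nums t m i < k) (hkm : k ≤ m) (hik : i ≤ k) :
    psum nums i + t < psum nums k := by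
  have := Nat.findGreatest_is_greatest (P := fun k => i ≤ k ∧ psum nums k ≤ psum nums i + t) hk hkm
  by_contra h
  exact this ⟨hik, by omega⟩

lemma kfn_mono (nums : List Int) (t : Int) (m i : Nat) (ht : 0 ≤ t)
    (hm : m ≤ nums.length) (hnn : ∀ x ∈ nums.take m, 0 ≤ x) (hi : i + 1 ≤ m) :
    kfn nums t m i ≤ kfn nums t m (i+1) := by
  obtain ⟨h1, h2, h3⟩ := kfn_spec nums t m i ht (by omega)
  obtain ⟨h1', h2', h3'⟩ := kfn_spec nums t m (i+1) ht hi
  rcases Nat.lt_or_ge (kfn nums t m i) (i+1) with h | h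
  · omega
  · apply Nat.le_findGreatest h2
    constructor
    · exact h
    · have : psum nums i ≤ psum nums (i+1) := psum_mono nums m hm hnn (i+1) hi i (by omega)
      omega

lemma sum_set_zero (f : List Int) (i : Nat) (v : Int) (h : i < f.length)
    (h0 : f.getD i 0 = 0) : (f.set i v).sum = f.sum + v := by
  rw [List.sum_set]
  have hf : f.sum = (f.take i).sum + ((f.drop i).sum) := by
    rw [← List.sum_append, List.take_append_drop]
  have hd : f.drop i = f[i] :: f.drop (i+1) := List.drop_eq_getElem_cons h
  have hg : f[i] = 0 := by
    have := List.getD_eq_getElem f 0 h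
    omega
  rw [hd, hg] at hf
  simp only [List.sum_cons, zero_add] at hf
  simp [if_pos h, hf]
  ring





lemma while_eq (nums : List Int) (t : Int) (m i a : Nat)
    (hm : m ≤ nums.length) (hia : i ≤ a)
    (hfeas : psum nums a ≤ psum nums i + t)
    (hgt : ∀ k : Nat, a < k → k ≤ m → psum nums i + t < psum nums k) :
    ∀ fuel (b : Nat), a ≤ b → b ≤ m → b - a ≤ fuel →
      solveWhile nums t fuel (psum nums b - psum nums i) ((b:Int) - 1)
        = (psum nums a - psum nums i, (a:Int) - 1) := by
  intro fuel
  induction fuel with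
  | zero =>
    intro b hab hbm hfuel
    have : b = a := by omega
    subst this
    rfl
  | succ fuel ih =>
    intro b hab hbm hfuel
    by_cases hs : psum nums b - psum nums i > t
    · have hba : a < b := by
        rcases Nat.lt_or_ge a b with h | h
        · exact h
        · have : b = a := by omega
          subst this; omega
      have hb1 : b - 1 < nums.length := by omega
      have hget : PySem.List.pyGet? nums ((b:Int) - 1) = some nums[b-1] := by
        have hcast : (b:Int) - 1 = ((b-1 : Nat) : Int) := by omega
        rw [hcast, PySem.List.pyGet?_natCast]
        exact List.getElem?_eq_getElem hb1
      have hstep : psum nums b - psum nums i - nums[b-1] = psum nums (b-1) - psum nums i := by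
        have := psum_succ nums (b-1) hb1
        have hb : b - 1 + 1 = b := by omega
        rw [hb] at this
        omega
      simp only [solveWhile, if_pos hs, hget]
      have hj : (b:Int) - 1 - 1 = ((b-1 : Nat):Int) - 1 := by omega
      rw [hstep, hj]
      exact ih (b-1) (by omega) (by omega) (by omega)
    · have hba : b = a := by
        by_contra hne
        have : a < b := by omega
        exact hs (by have := hgt b this hbm; omega)
      subst hba
      simp [solveWhile, hs]

lemma upper_eq (P : List Int) (x : Int) (r : Int) :
    ∀ fuel (lo hi : Int), lo ≤ r → r ≤ hi →
      (∀ k : Int, lo ≤ k → k < r → (PySem.List.pyGet? P k).getD 0 ≤ x) →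
      (∀ k : Int, r ≤ k → k < hi → x < (PySem.List.pyGet? P k).getD 0) →
      (hi - lo).toNat ≤ fuel → upperStep P x fuel lo hi = r := by
  intro fuel
  induction fuel with
  | zero =>
    intro lo hi h1 h2 _ _ hfuel
    have : lo = r := by omega
    simpa [upperStep] using this
  | succ fuel ih =>
    intro lo hi h1 h2 hsmall hbig hfuel
    by_cases hlh : lo < hi
    · have hmid : lo ≤ PySem.Int.floordiv (lo + hi) 2 ∧ PySem.Int.floordiv (lo + hi) 2 ≤ hi :=
        PySem.Int.floordiv_two_mid_bounds (by omega)
      have hmid2 : PySem.Int.floordiv (lo + hi) 2 < hi := by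
        rw [PySem.Int.floordiv_lt_iff_lt_mul (by omega : (0:Int) < 2)]
        omega
      set mid := PySem.Int.floordiv (lo + hi) 2 with hmiddef
      by_cases hle : (PySem.List.pyGet? P mid).getD 0 ≤ x
      · have hmr : mid < r := by
          by_contra h
          exact absurd hle (by simpa using (hbig mid (by omega) (by omega)).not_ge)
        simp only [upperStep, if_pos hlh, ← hmiddef, if_pos hle]
        exact ih (mid+1) hi (by omega) h2 (fun k hk1 hk2 => hsmall k (by omega) hk2)
          hbig (by omega)
      · have hrm : r ≤ mid := by
          by_contra h
          exact hle (hsmall mid hmid.1 (by omega))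
        simp only [upperStep, if_pos hlh, ← hmiddef, if_neg hle]
        exact ih lo mid h1 hrm hsmall (fun k hk1 hk2 => hbig k hk1 (by omega)) (by omega)
    · have : lo = r := by omega
      simpa [upperStep, if_neg hlh] using this

lemma set_append_len {α : Type} (A B : List α) (v : α) :
    (A ++ B).set A.length v = A ++ B.set 0 v := by
  induction A with
  | nil => simp
  | cons a A ih => simp [ih]

lemma mapP_get (nums : List Int) (m : Nat) (k : Int) (h0 : 0 ≤ k) (hk : k ≤ (m:Int)) :
    (PySem.List.pyGet? ((List.range (m+1)).map (fun k => psum nums k)) k).getD 0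
      = psum nums k.toNat := by
  have hc : k = ((k.toNat : Nat) : Int) := by omega
  rw [hc, PySem.List.pyGet?_natCast]
  have hlt : k.toNat < m + 1 := by omega
  rw [List.getElem?_map, List.getElem?_range hlt]
  rfl

lemma buildP_eq (n : Int) (nums : List Int) (m : Nat) (hm : (m:Int) = n)
    (hlen : m ≤ nums.length) :
    buildP n nums = (List.range (m+1)).map (fun k => psum nums k) := by
  have haux : ∀ q, q ≤ m →
      (List.range q).foldl
        (fun (P : List Int) (k : Nat) => P.set ((0 + (k:Int) + 1).toNat)
          ((PySem.List.pyGet? P (0 + (k:Int))).getD 0 + (PySem.List.pyGet? nums (0 + (k:Int))).getD 0))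
        (List.replicate (m+1) 0)
      = (List.range (q+1)).map (fun k => psum nums k) ++ List.replicate (m - q) 0 := by
    intro q
    induction q with
    | zero =>
      intro _
      simp [psum, List.replicate_succ]
    | succ q ih =>
      intro hq
      rw [List.range_succ, List.foldl_append, ih (by omega)]
      set L := (List.range (q+1)).map (fun k => psum nums k) ++ List.replicate (m - q) 0 with hL
      simp only [List.foldl_cons, List.foldl_nil]
      have hzq : (0:Int) + (q:Int) = ((q:Nat):Int) := by omega
      have hLq : PySem.List.pyGet? L ((q:Nat):Int) = some (psum nums q) := by
        rw [PySem.List.pyGet?_natCast]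
        rw [hL, List.getElem?_append_left (by simp)]
        simp
      have hNq : PySem.List.pyGet? nums ((q:Nat):Int) = some (nums[q]'(by omega)) := by
        rw [PySem.List.pyGet?_natCast]
        exact List.getElem?_eq_getElem (by omega)
      have hval : psum nums q + nums[q]'(by omega) = psum nums (q+1) :=
        (psum_succ nums q (by omega)).symm
      have htn : ((0:Int) + (q:Int) + 1).toNat = q + 1 := by omega
      rw [hzq] at htn ⊢
      rw [hLq, hNq, htn]
      have hlenA : ((List.range (q+1)).map (fun k => psum nums k)).length = q + 1 := by simp
      have hrep : List.replicate (m - q) (0:Int) = 0 :: List.replicate (m - q - 1) 0 := by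
        rw [← List.replicate_succ]
        congr 1
        omega
      simp only [Option.getD_some, hval]
      have hset := set_append_len ((List.range (q+1)).map (fun k => psum nums k))
        (List.replicate (m - q) 0) (psum nums (q+1))
      rw [hlenA] at hset
      rw [hL, hset, hrep, List.set_cons_zero]
      rw [List.range_succ (n := q+1), List.map_append]
      simp only [List.map_cons, List.map_nil, List.append_assoc,
        List.cons_append, List.nil_append]
      congr 3
  unfold buildP
  have hr := PySem.List.pyRange_one 0 n
  have hn0 : (n - 0).toNat = m := by omega
  rw [hr, hn0, List.foldl_map]
  have hrepm : (n+1).toNat = m + 1 := by omega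
  rw [hrepm]
  have := haux m (le_refl m)
  simpa using this


lemma loop_eq (nums : List Int) (t : Int) (n : Int) (m : Nat) (hm : (m:Int) = n)
    (hlen : m ≤ nums.length) (ht : 0 ≤ t) (hnn : ∀ x ∈ nums.take m, 0 ≤ x)
    (P : List Int) (hP : P = (List.range (m+1)).map (fun k => psum nums k)) :
    ∀ (i : Nat), i ≤ m → ∀ (f : List Int) (tot : Int),
      f.length = m+1 → (∀ k : Nat, k < i → f.getD k 0 = 0) → tot = f.sum →
      ((PySem.List.pyRange ((i:Int)-1) (-1) (-1)).foldl (solveStep n t nums)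
          ((kfn nums t m i : Int) - 1, psum nums (kfn nums t m i) - psum nums i, f)).2.2.sum
        = ((PySem.List.pyRange ((i:Int)-1) (-1) (-1)).foldl (altStep n t P) (f, tot)).2 := by
  intro i
  induction i with
  | zero =>
    intro _ f tot _ _ htot
    simp only [Nat.cast_zero, zero_sub]
    rw [PySem.List.pyRange_neg_one_eq_nil (by omega)]
    simp [htot]
  | succ i ih =>
    intro hi f tot hflen hzero htot
    set K1 := kfn nums t m (i+1) with hK1
    set K0 := kfn nums t m i with hK0
    obtain ⟨hK0a, hK0b, hK0c⟩ := kfn_spec nums t m i ht (by omega)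
    obtain ⟨hK1a, hK1b, hK1c⟩ := kfn_spec nums t m (i+1) ht (by omega)
    rw [← hK0] at hK0a hK0b hK0c
    rw [← hK1] at hK1a hK1b hK1c
    have hK01 : K0 ≤ K1 := by
      have := kfn_mono nums t m i ht hlen hnn hi
      rw [← hK0, ← hK1] at this
      exact this
    have hcast : ((i+1 : Nat) : Int) - 1 = (i:Int) := by push_cast; ring
    rw [hcast, PySem.List.pyRange_neg_one_cons (by omega)]
    rw [List.foldl_cons, List.foldl_cons]
    -- the A-side step
    have hnum : (PySem.List.pyGet? nums (i:Int)).getD 0 = nums[i]'(by omega) := by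
      rw [PySem.List.pyGet?_natCast, List.getElem?_eq_getElem (by omega)]
      rfl
    have hs0 : psum nums K1 - psum nums (i+1) + nums[i]'(by omega) = psum nums K1 - psum nums i := by
      have := psum_succ nums i (by omega)
      omega
    have hwhile : solveWhile nums t (((K1:Int) - 1) + (nums.length:Int) + 2).toNat
        (psum nums K1 - psum nums i) ((K1:Int) - 1)
        = (psum nums K0 - psum nums i, (K0:Int) - 1) := by
      exact while_eq nums t m i K0 hlen hK0a hK0c
        (fun k hk1 hk2 => kfn_greatest nums t m i k hk1 hk2 (by omega))
        _ K1 hK01 hK1b (by omega)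
    have hAstep : solveStep n t nums ((K1:Int) - 1, psum nums K1 - psum nums (i+1), f) (i:Int)
        = ((K0:Int) - 1, psum nums K0 - psum nums i,
           if (K0:Int) - 1 < (i:Int) then
             f.set i ((PySem.List.pyGet? f ((i:Int)+1)).getD 0)
           else
             f.set i (((K0:Int) - 1 - (i:Int) + 1) +
               (if (K0:Int) - 1 + 2 < n then (PySem.List.pyGet? f ((K0:Int) - 1 + 2)).getD 0 else 0))) := by
      simp only [solveStep, hnum]
      rw [hs0, hwhile]
      simp only [Int.toNat_natCast]
      by_cases hb : (K0:Int) - 1 < (i:Int)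
      · rw [if_pos hb, if_pos hb, if_neg (by omega)]
      · rw [if_neg hb, if_neg hb, if_pos (by omega)]
    -- the B-side step
    have hPi : (PySem.List.pyGet? P (i:Int)).getD 0 = psum nums i := by
      rw [hP, mapP_get nums m (i:Int) (by omega) (by omega)]
      simp
    have hupper : upperStep P (psum nums i + t) ((n + 1 - (i:Int)).toNat) (i:Int) (n+1)
        = (K0:Int) + 1 := by
      apply upper_eq P (psum nums i + t) ((K0:Int) + 1) _ _ _ (by omega)
        (by omega)
      · intro k hk1 hk2
        rw [hP, mapP_get nums m k (by omega) (by omega)]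
        have h1 : psum nums k.toNat ≤ psum nums K0 :=
          psum_mono nums m hlen hnn K0 hK0b k.toNat (by omega)
        omega
      · intro k hk1 hk2
        rw [hP, mapP_get nums m k (by omega) (by omega)]
        exact kfn_greatest nums t m i k.toNat (by omega) (by omega) (by omega)
      · exact le_refl _
    have hBstep : altStep n t P (f, tot) (i:Int)
        = (if (K0:Int) - 1 < (i:Int) then
             f.set i ((PySem.List.pyGet? f ((i:Int)+1)).getD 0)
           else
             f.set i (((K0:Int) - 1 - (i:Int) + 1) +
               (if (K0:Int) - 1 + 2 < n then (PySem.List.pyGet? f ((K0:Int) - 1 + 2)).getD 0 else 0)),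
           tot + (PySem.List.pyGet?
             (if (K0:Int) - 1 < (i:Int) then
               f.set i ((PySem.List.pyGet? f ((i:Int)+1)).getD 0)
             else
               f.set i (((K0:Int) - 1 - (i:Int) + 1) +
                 (if (K0:Int) - 1 + 2 < n then (PySem.List.pyGet? f ((K0:Int) - 1 + 2)).getD 0 else 0)))
             (i:Int)).getD 0) := by
      simp only [altStep, hPi, hupper]
      have hsub : (K0:Int) + 1 - 2 = (K0:Int) - 1 := by ring
      rw [hsub]
      simp only [Int.toNat_natCast]
    rw [hAstep, hBstep]
    -- the updated array and the bookkeeping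
    set v := if (K0:Int) - 1 < (i:Int) then (PySem.List.pyGet? f ((i:Int)+1)).getD 0
      else (((K0:Int) - 1 - (i:Int) + 1) +
        (if (K0:Int) - 1 + 2 < n then (PySem.List.pyGet? f ((K0:Int) - 1 + 2)).getD 0 else 0)) with hv
    have hsetv : (if (K0:Int) - 1 < (i:Int) then
             f.set i ((PySem.List.pyGet? f ((i:Int)+1)).getD 0)
           else
             f.set i (((K0:Int) - 1 - (i:Int) + 1) +
               (if (K0:Int) - 1 + 2 < n then (PySem.List.pyGet? f ((K0:Int) - 1 + 2)).getD 0 else 0)))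
        = f.set i v := by
      rw [hv]
      by_cases hb : (K0:Int) - 1 < (i:Int)
      · rw [if_pos hb, if_pos hb]
      · rw [if_neg hb, if_neg hb]
    rw [hsetv]
    have hfi : i < f.length := by omega
    have hget : (PySem.List.pyGet? (f.set i v) (i:Int)).getD 0 = v := by
      rw [PySem.List.pyGet?_natCast, List.getElem?_set_self hfi]
      rfl
    rw [hget]
    exact ih (by omega) (f.set i v) (tot + v)
      (by simpa using hflen)
      (by
        intro k hk
        rw [List.getD_eq_getElem?_getD, List.getElem?_set_ne (by omega),
          ← List.getD_eq_getElem?_getD]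
        exact hzero k (by omega))
      (by
        rw [sum_set_zero f i v hfi (hzero i (by omega))]
        omega)

-- ===== VERDICT (by name: the statement is the Claim_ definition above) =====
theorem solve_spec : Claim_equal_solve := by
  intro n t nums _ hPre
  obtain ⟨hlen, ht, hnn⟩ := hPre
  unfold Spec_solve
  by_cases hn : n ≤ 0
  · simp only [solve, solve_alt, if_pos hn]
    rw [PySem.List.pyRange_neg_one_eq_nil (by omega)]
    simp
  · replace hn : 0 < n := by omega
    set m := n.toNat with hmdef
    have hm : (m:Int) = n := Int.toNat_of_nonneg (by omega)
    have hlen' : m ≤ nums.length := by omega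
    have hkm : kfn nums t m m = m := by
      obtain ⟨h1, h2, _⟩ := kfn_spec nums t m m ht (le_refl m)
      omega
    have hmain := loop_eq nums t n m hm hlen' ht hnn _ rfl m (le_refl m)
      (List.replicate (m+1) 0) 0 (by simp) (by intro k hk; simp) (by simp)
    rw [hkm] at hmain
    simp only [sub_self] at hmain
    rw [← hm] at hmain
    simp only [solve, solve_alt, if_neg (by omega : ¬ n ≤ 0)]
    rw [buildP_eq n nums m hm hlen']
    rw [← hm]
    have hrep : ((m:Int) + 1).toNat = m + 1 := by omega
    rw [hrep]
    exact hmain
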